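-- pv_equiv track=rewrite | github.com/kino-6/doc2md-converter | tests/test_pretty_printer_properties.py | count_consecutive_blank_lines
-- ===== SOURCE A (Python) =====
-- def count_consecutive_blank_lines(text: str) -> int:
--     """Count the maximum number of consecutive blank lines in text.
--
--     Args:
--         text: Text to analyze
--
--     Returns:
--         Maximum number of consecutive blank lines
--     """
--     lines = text.split("\n")
--     max_consecutive = 0
--     current_consecutive = 0
--
--     for line in lines:
--         if line.strip() == "":
--             current_consecutive += 1
--             max_consecutive = max(max_consecutive, current_consecutive)
--         else:
--             current_consecutive = 0
--
--     return max_consecutive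
-- ===== SOURCE B (Python) =====
-- def count_consecutive_blank_lines(text: str) -> int:
--     """Count the maximum number of consecutive blank lines in text."""
--     lines = text.split("\n")
--     stops = [-1] + [i for i, line in enumerate(lines) if line.strip() != ""] + [len(lines)]
--     return max((b - a - 1 for a, b in zip(stops, stops[1:])), default=0)
-- ===== Notes on version B (the rewrite author's own statement) =====
-- stated objective: alternative
-- what changed: Instead of threading a running counter and running max through the line loop, B builds the sentinel-bounded list of non-blank line indices ([-1] + indices + [len]) and returns the maximum gap between consecutive ones.
import Mathlib
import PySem

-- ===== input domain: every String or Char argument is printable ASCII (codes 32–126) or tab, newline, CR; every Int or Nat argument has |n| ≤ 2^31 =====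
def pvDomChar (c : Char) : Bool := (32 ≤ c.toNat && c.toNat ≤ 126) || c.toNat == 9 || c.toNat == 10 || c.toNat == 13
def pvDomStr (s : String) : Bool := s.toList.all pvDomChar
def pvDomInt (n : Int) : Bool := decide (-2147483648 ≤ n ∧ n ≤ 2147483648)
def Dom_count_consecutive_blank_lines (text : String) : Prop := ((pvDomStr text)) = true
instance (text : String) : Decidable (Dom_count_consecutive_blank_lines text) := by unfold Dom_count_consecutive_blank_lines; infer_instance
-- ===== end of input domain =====

-- B replaces A's running counter+max loop by a different decomposition: it collects the
-- sentinel-bounded indices of the non-blank lines and takes the maximum gap between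
-- consecutive ones (objective: alternative, same O(n) cost).


-- ===== PORT A =====
-- the for-loop threading (max_consecutive, current_consecutive)
def pvALoop : List String → Int → Int → Int
  | [], maxc, _ => maxc
  | l :: ls, maxc, cur =>
    if PySem.Str.strip l == "" then pvALoop ls (max maxc (cur + 1)) (cur + 1)
    else pvALoop ls maxc 0

def count_consecutive_blank_lines (text : String) : Int :=
  -- text.split("\n"): sep ≠ "" so split? is always some; getD never fires
  pvALoop ((PySem.Str.split? text "\n").getD []) 0 0

-- ===== PORT B =====
def count_consecutive_blank_lines_alt (text : String) : Int :=
  let lines := (PySem.Str.split? text "\n").getD []   -- text.split("\n"); sep ≠ "" so some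
  let stops : List Int :=
    [-1] ++ ((PySem.List.enumerate lines).filter
               (fun p => !(PySem.Str.strip p.2 == ""))).map (fun p => p.1)
         ++ [(lines.length : Int)]
  PySem.List.maxD ((stops.zip (PySem.List.slice stops (some 1) none)).map
                     (fun p => p.2 - p.1 - 1)) (fun g => g) 0

-- ===== PRECONDITION & SPEC =====
def Spec_count_consecutive_blank_lines (text : String) (out : Int) : Prop := out = count_consecutive_blank_lines_alt text
instance (text : String) (out : Int) : Decidable (Spec_count_consecutive_blank_lines text out) := by unfold Spec_count_consecutive_blank_lines; infer_instance

-- ===== CLAIM (what is proved, stated in full; the proofs are below) =====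
def Claim_equal_count_consecutive_blank_lines : Prop := ∀ (text : String), Dom_count_consecutive_blank_lines text → Spec_count_consecutive_blank_lines text (count_consecutive_blank_lines text)

-- ===== LEMMAS AND PROOFS =====

-- proof-side model: the list of blank-run lengths, c = length of the run in progress
def pvRuns : Int → List String → List Int
  | c, [] => [c]
  | c, l :: ls =>
    if PySem.Str.strip l == "" then pvRuns (c + 1) ls else c :: pvRuns 0 ls

-- proof-side model of B's comprehension: non-blank indices starting at i
def pvNb : Int → List String → List Int
  | _, [] => []
  | i, l :: ls =>
    if PySem.Str.strip l == "" then pvNb (i + 1) ls else i :: pvNb (i + 1) ls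

-- adjacent gaps of a stop list
def pvGaps (s : List Int) : List Int := (s.zip s.tail).map (fun p => p.2 - p.1 - 1)

theorem pvNb_eq_filter_enumerate (ls : List String) (i : Int) :
    ((PySem.List.enumerate ls i).filter
        (fun p => !(PySem.Str.strip p.2 == ""))).map (fun p => p.1) = pvNb i ls := by
  induction ls generalizing i with
  | nil => simp [PySem.List.enumerate_nil, pvNb]
  | cons l ls ih =>
    rw [PySem.List.enumerate_cons]
    by_cases h : PySem.Str.strip l == ""
    · simp [pvNb, h, ih]
    · simp [pvNb, h, ih]

theorem pvGaps_cons (a b : Int) (r : List Int) :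
    pvGaps (a :: b :: r) = (b - a - 1) :: pvGaps (b :: r) := by
  simp [pvGaps]

theorem pvGaps_stops (ls : List String) (i p : Int) :
    pvGaps (p :: pvNb i ls ++ [i + ls.length]) = pvRuns (i - p - 1) ls := by
  induction ls generalizing i p with
  | nil => simp [pvNb, pvRuns, pvGaps]
  | cons l ls ih =>
    by_cases h : PySem.Str.strip l == ""
    · have := ih (i + 1) p
      simp only [pvNb, pvRuns, h, if_true, List.length_cons] at *
      push_cast at this ⊢
      rw [show (i + (↑ls.length + 1) : Int) = (i + 1) + ls.length by ring, this]
      ring_nf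
    · simp only [pvNb, pvRuns, h, if_false, Bool.false_eq_true, List.length_cons,
        List.cons_append]
      rw [pvGaps_cons]
      have h2 : pvGaps (i :: pvNb (i + 1) ls ++ [i + 1 + (ls.length : Int)]) = pvRuns 0 ls := by
        have := ih (i + 1) i
        norm_num at this
        exact this
      push_cast
      rw [show (i + ((ls.length : Int) + 1)) = i + 1 + (ls.length : Int) by ring]
      rw [← List.cons_append, h2]

theorem pvRuns_head_ge (ls : List String) (c : Int) :
    ∃ x t, pvRuns c ls = x :: t ∧ c ≤ x := by
  induction ls generalizing c with
  | nil => exact ⟨c, [], rfl, le_refl c⟩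
  | cons l ls ih =>
    by_cases h : PySem.Str.strip l == ""
    · obtain ⟨x, t, hx, hc⟩ := ih (c + 1)
      exact ⟨x, t, by simp [pvRuns, h, hx], by omega⟩
    · exact ⟨c, pvRuns 0 ls, by simp [pvRuns, h], le_refl c⟩

theorem foldl_max_absorb (l : List Int) (a b : Int) :
    l.foldl max (max a b) = max b (l.foldl max a) := by
  induction l generalizing a with
  | nil => simp [max_comm]
  | cons x t ih =>
    simp only [List.foldl_cons]
    rw [show max (max a b) x = max (max a x) b by
      rw [max_right_comm], ih]

theorem pvALoop_eq_foldl (ls : List String) (maxc cur : Int)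
    (h0 : 0 ≤ cur) (h : cur ≤ maxc) :
    pvALoop ls maxc cur = (pvRuns cur ls).foldl max maxc := by
  induction ls generalizing maxc cur with
  | nil => simp [pvALoop, pvRuns, max_eq_left h]
  | cons l t ih =>
    by_cases hb : PySem.Str.strip l == ""
    · simp only [pvALoop, pvRuns, hb, if_true]
      rw [ih _ _ (by omega) (le_max_right maxc (cur + 1)), foldl_max_absorb]
      obtain ⟨x, r, hx, hc⟩ := pvRuns_head_ge t (cur + 1)
      rw [hx]
      simp only [List.foldl_cons]
      rw [foldl_max_absorb]
      omega
    · simp only [pvALoop, pvRuns, hb, if_false, Bool.false_eq_true, List.foldl_cons]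
      rw [ih _ _ (le_refl 0) (by omega), foldl_max_absorb]
      have := (PySem.List.le_foldl_max (pvRuns 0 t) maxc).1
      omega

-- ===== VERDICT (by name: the statement is the Claim_ definition above) =====
theorem count_consecutive_blank_lines_spec : Claim_equal_count_consecutive_blank_lines := by
  intro text _
  unfold Spec_count_consecutive_blank_lines count_consecutive_blank_lines
    count_consecutive_blank_lines_alt
  simp only [PySem.List.slice_from_one, pvNb_eq_filter_enumerate, List.cons_append,
    List.nil_append]
  set lines := (PySem.Str.split? text "\n").getD [] with hl
  have hzip : ((-1 :: (pvNb 0 lines ++ [(lines.length : Int)])).zip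
      (-1 :: (pvNb 0 lines ++ [(lines.length : Int)])).tail).map
      (fun p => p.2 - p.1 - 1) = pvGaps (-1 :: pvNb 0 lines ++ [(lines.length : Int)]) := rfl
  rw [hzip]
  have hg : pvGaps (-1 :: pvNb 0 lines ++ [(lines.length : Int)]) = pvRuns 0 lines := by
    have := pvGaps_stops lines 0 (-1)
    norm_num at this
    exact this
  rw [hg]
  obtain ⟨x, t, hx, hc⟩ := pvRuns_head_ge lines 0
  rw [pvALoop_eq_foldl lines 0 0 le_rfl le_rfl, hx]
  simp only [PySem.List.maxD, PySem.List.max?_id_cons, Option.getD_some, List.foldl_cons]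
  rw [show max (0 : Int) x = x by omega]
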